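-- pv_equiv track=rewrite | github.com/David-Xilo/CodingPlatforms | Rosalind/BioinformaticsStronghold/DNA.py | count_chars_in_string
-- ===== SOURCE A (Python) =====
-- def count_chars_in_string(list_chars, sequence):
--     result = {}
--     for element in list_chars:
--         result[element] = 0
--     for ch in sequence:
--         if ch in result:
--             result[ch] += 1
--     return [result[key] for key in list_chars]
-- ===== SOURCE B (Python) =====
-- def count_chars_in_string(list_chars, sequence):
--     return [sum(1 for ch in sequence if ch == c) for c in list_chars]
-- ===== Notes on version B (the rewrite author's own statement) =====
-- stated objective: simpler
-- what changed: B drops the count dictionary entirely and returns a one-line comprehension that counts each target by scanning the sequence directly (outer loop over list_chars, inner scan over sequence), instead of A's single indexed pass that builds and then reads back a dict.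
import Mathlib
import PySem

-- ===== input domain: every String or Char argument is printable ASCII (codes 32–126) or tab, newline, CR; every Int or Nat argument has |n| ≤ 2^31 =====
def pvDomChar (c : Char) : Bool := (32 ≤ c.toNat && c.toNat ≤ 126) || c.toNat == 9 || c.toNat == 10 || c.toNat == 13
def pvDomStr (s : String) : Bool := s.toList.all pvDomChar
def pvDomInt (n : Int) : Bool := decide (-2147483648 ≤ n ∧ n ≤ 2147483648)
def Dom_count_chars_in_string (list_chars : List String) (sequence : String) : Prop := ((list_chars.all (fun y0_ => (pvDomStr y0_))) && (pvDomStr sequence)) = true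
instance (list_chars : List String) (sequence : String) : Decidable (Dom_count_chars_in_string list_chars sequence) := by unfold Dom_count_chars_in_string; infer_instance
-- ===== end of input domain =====

-- B replaces A's dict-counting pass by a direct per-target rescan of the sequence (objective: simpler, same return value).

-- ===== PORT A =====
-- result = {}; for element in list_chars: result[element] = 0
-- for ch in sequence: if ch in result: result[ch] += 1
-- return [result[key] for key in list_chars]
def count_chars_in_string (list_chars : List String) (sequence : String) : List Int :=
  let result : PySem.Dict String Int :=
    list_chars.foldl (fun d element => d.insert element 0) PySem.Dict.empty
  let result2 : PySem.Dict String Int :=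
    sequence.toList.foldl
      (fun d ch =>
        if d.contains (String.ofList [ch]) then d.modify (String.ofList [ch]) 0 (· + 1) else d)
      result
  list_chars.map (fun key => result2.getD key 0)

-- ===== PORT B =====
-- return [sum(1 for ch in sequence if ch == c) for c in list_chars]
def count_chars_in_string_alt (list_chars : List String) (sequence : String) : List Int :=
  list_chars.map (fun c =>
    sequence.toList.foldl (fun acc ch => if String.ofList [ch] = c then acc + 1 else acc) 0)

-- ===== PRECONDITION & SPEC =====
def Spec_count_chars_in_string (list_chars : List String) (sequence : String) (out : List Int) : Prop := out = count_chars_in_string_alt list_chars sequence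
instance (list_chars : List String) (sequence : String) (out : List Int) : Decidable (Spec_count_chars_in_string list_chars sequence out) := by unfold Spec_count_chars_in_string; infer_instance

-- ===== CLAIM (what is proved, stated in full; the proofs are below) =====
def Claim_equal_count_chars_in_string : Prop := ∀ (list_chars : List String) (sequence : String), Dom_count_chars_in_string list_chars sequence → Spec_count_chars_in_string list_chars sequence (count_chars_in_string list_chars sequence)

-- ===== LEMMAS AND PROOFS =====

-- the initial dict maps every key to 0
theorem pv_init_getD (xs : List String) (d : PySem.Dict String Int) (k : String)
    (h : d.getD k 0 = 0) :
    (xs.foldl (fun d element => d.insert element 0) d).getD k 0 = 0 := by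
  induction xs generalizing d with
  | nil => simpa using h
  | cons x xs ih =>
      simp only [List.foldl_cons]
      exact ih _ (by rw [PySem.Dict.getD_insert]; split <;> simp [h])

-- the guarded counting loop adds, at each contained key k, the number of chars equal to k
theorem pv_loop_getD (cs : List Char) (d : PySem.Dict String Int) (k : String)
    (hk : d.contains k = true) :
    (cs.foldl
      (fun d ch =>
        if d.contains (String.ofList [ch]) then d.modify (String.ofList [ch]) 0 (· + 1) else d)
      d).getD k 0
      = d.getD k 0 + ((cs.countP (fun ch => String.ofList [ch] = k) : Nat) : Int) := by
  induction cs generalizing d with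
  | nil => simp
  | cons ch cs ih =>
      simp only [List.foldl_cons, List.countP_cons]
      by_cases hc : d.contains (String.ofList [ch]) = true
      · rw [if_pos hc]
        have hk' : (d.modify (String.ofList [ch]) 0 (· + 1)).contains k = true := by
          rw [PySem.Dict.contains_modify]; simp [hk]
        rw [ih _ hk', PySem.Dict.getD_modify]
        by_cases he : k = String.ofList [ch]
        · simp [he]
          ring
        · have : ¬ (String.ofList [ch] = k) := fun h => he h.symm
          simp [he, this]
      · rw [if_neg hc, ih _ hk]
        have hne : ¬ (String.ofList [ch] = k) := by
          intro h; exact hc (h ▸ hk)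
        simp [hne]

-- ===== VERDICT (by name: the statement is the Claim_ definition above) =====
theorem count_chars_in_string_spec : Claim_equal_count_chars_in_string := by
  intro list_chars sequence _
  unfold Spec_count_chars_in_string count_chars_in_string count_chars_in_string_alt
  apply List.map_congr_left
  intro k hk
  have hcont :
      ((list_chars.foldl (fun d element => d.insert element 0)
          (PySem.Dict.empty : PySem.Dict String Int)).contains k) = true := by
    rw [PySem.Dict.contains_iff_mem_keys, PySem.Dict.keys_foldl_insert]
    simp [PySem.Dict.keys_empty, PySem.Set.mem_update, hk]
  rw [pv_loop_getD _ _ _ hcont,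
      pv_init_getD _ _ _ (by simp [PySem.Dict.getD_empty])]
  have hB := PySem.List.foldl_count_if (fun ch => decide (String.ofList [ch] = k)) sequence.toList 0
  simp only [decide_eq_true_eq] at hB
  rw [hB]
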